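-- pv_equiv track=rewrite | github.com/qpwoeirut/competitive-programming | USACO/pythonWork/selfUsacoTraining/2017_open_bronze/problem_1.py | website_solution_translated
-- ===== SOURCE A (Python) =====
-- def website_solution_translated(x, y):
--     ans = 0
--     by = 1
--     dir = 1
--
--     while True:
--         if (dir == 1 and x <= y and y <= x + by) or (dir == -1 and x - by <= y and y <= x):
--             ans += abs(y-x)
--             return ans
--         else:
--             ans += by * 2
--             by *= 2
--             dir *= -1
-- ===== SOURCE B (Python) =====
-- def website_solution_translated(x, y):
--     # Closed form: the cow is caught on the first probe whose reach `by`
--     # (1,4,16,... when y>=x; 2,8,32,... when y<x) covers d = |y-x|;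
--     # total distance = 2*(by-1) + d.
--     d = abs(y - x)
--     if d == 0:
--         return 0
--     by = 1 if x < y else 2
--     while by < d:
--         by *= 4
--     return 2 * (by - 1) + d
-- ===== Notes on version B (the rewrite author's own statement) =====
-- stated objective: simpler
-- what changed: Replaces the doubling/direction-alternating simulation with accumulator by the closed form 2*(by-1)+|y-x|, where by is the smallest probe reach (4^k for y>x, 2*4^k for y<x) covering |y-x|, found by a short multiply-by-4 loop.
import Mathlib
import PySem

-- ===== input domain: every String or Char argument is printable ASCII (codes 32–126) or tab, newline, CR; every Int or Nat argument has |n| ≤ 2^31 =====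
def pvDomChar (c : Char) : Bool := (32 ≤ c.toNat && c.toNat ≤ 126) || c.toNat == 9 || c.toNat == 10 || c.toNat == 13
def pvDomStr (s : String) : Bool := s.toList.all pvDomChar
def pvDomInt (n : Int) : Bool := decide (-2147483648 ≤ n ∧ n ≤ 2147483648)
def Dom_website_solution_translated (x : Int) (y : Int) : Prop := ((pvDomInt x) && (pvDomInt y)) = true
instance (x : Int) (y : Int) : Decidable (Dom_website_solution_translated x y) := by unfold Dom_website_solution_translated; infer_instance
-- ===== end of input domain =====

-- B replaces A's doubling/direction-alternating simulation by the closed form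
-- 2*(by-1)+|y-x| with `by` the smallest probe reach covering |y-x| (objective: simpler).

-- ===== PORT A =====
-- `while True` loop, state (ans, by, dir); dir only ever takes values 1/-1, ported as Bool
-- (true = 1). The fuel argument is only a totality guard: within Dom the loop returns after
-- at most ~35 iterations, far below the 2^40 supplied.
def pvLoopA (x : Int) (y : Int) (fuel : Nat) (ans : Int) (b : Int) (dir : Bool) : Int :=
  match fuel with
  | 0 => ans
  | f + 1 =>
    if (dir = true ∧ x ≤ y ∧ y ≤ x + b) ∨ (dir = false ∧ x - b ≤ y ∧ y ≤ x) then
      ans + |y - x|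
    else
      pvLoopA x y f (ans + b * 2) (b * 2) (!dir)

def website_solution_translated (x : Int) (y : Int) : Int :=
  pvLoopA x y (2 ^ 40) 0 1 true

-- ===== PORT B =====
-- `while by < d: by *= 4` (the positivity argument only justifies termination)
def pvLoopB (d : Int) (b : Int) (hb : 0 < b) : Int :=
  if b < d then pvLoopB d (b * 4) (by omega) else b
termination_by (d - b).toNat
decreasing_by omega

def website_solution_translated_alt (x : Int) (y : Int) : Int :=
  let d := |y - x|
  if d = 0 then 0
  else if x < y then 2 * (pvLoopB d 1 one_pos - 1) + d
  else 2 * (pvLoopB d 2 two_pos - 1) + d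

-- ===== PRECONDITION & SPEC =====
def Spec_website_solution_translated (x : Int) (y : Int) (out : Int) : Prop := out = website_solution_translated_alt x y
instance (x : Int) (y : Int) (out : Int) : Decidable (Spec_website_solution_translated x y out) := by unfold Spec_website_solution_translated; infer_instance

-- ===== CLAIM (what is proved, stated in full; the proofs are below) =====
def Claim_equal_website_solution_translated : Prop := ∀ (x : Int) (y : Int), Dom_website_solution_translated x y → Spec_website_solution_translated x y (website_solution_translated x y)

-- ===== LEMMAS AND PROOFS =====

lemma pvLoopB_unfold (d b : Int) (hb : 0 < b) :
    pvLoopB d b hb = if b < d then pvLoopB d (b * 4) (by omega) else b := by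
  rw [pvLoopB]

-- starting phase dir = true, in the case x < y
lemma pvLoopA_true (x y : Int) (hxy : x < y) :
    ∀ (n : Nat) (fuel : Nat) (ans b : Int) (hb : 0 < b),
      (y - x - b).toNat = n → 2 * n + 2 ≤ fuel →
      pvLoopA x y fuel ans b true = ans + 2 * (pvLoopB (y - x) b hb - b) + (y - x) := by
  intro n
  induction n using Nat.strong_induction_on with
  | _ n ih =>
    intro fuel ans b hb hn hfuel
    obtain ⟨f, rfl⟩ : ∃ f, fuel = f + 1 := ⟨fuel - 1, by omega⟩
    rw [pvLoopA]
    by_cases hle : y ≤ x + b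
    · rw [if_pos (Or.inl ⟨rfl, le_of_lt hxy, hle⟩)]
      rw [pvLoopB_unfold, if_neg (by omega), abs_of_pos (by omega)]
      ring
    · rw [if_neg (by simp; omega)]
      obtain ⟨g, rfl⟩ : ∃ g, f = g + 1 := ⟨f - 1, by omega⟩
      rw [pvLoopA]
      rw [if_neg (by simp; omega)]
      have hstep := ih (y - x - b * 4).toNat (by omega) g (ans + b * 2 + b * 2 * 2)
        (b * 2 * 2) (by omega) (by omega) (by omega)
      simp only [Bool.not_not]
      rw [hstep]
      rw [pvLoopB_unfold (y - x) b hb, if_pos (by omega)]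
      have : b * 2 * 2 = b * 4 := by ring
      simp only [this]
      ring

-- starting phase dir = false, in the case y < x
lemma pvLoopA_false (x y : Int) (hxy : y < x) :
    ∀ (n : Nat) (fuel : Nat) (ans b : Int) (hb : 0 < b),
      (x - y - b).toNat = n → 2 * n + 2 ≤ fuel →
      pvLoopA x y fuel ans b false = ans + 2 * (pvLoopB (x - y) b hb - b) + (x - y) := by
  intro n
  induction n using Nat.strong_induction_on with
  | _ n ih =>
    intro fuel ans b hb hn hfuel
    obtain ⟨f, rfl⟩ : ∃ f, fuel = f + 1 := ⟨fuel - 1, by omega⟩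
    rw [pvLoopA]
    by_cases hle : x - b ≤ y
    · rw [if_pos (Or.inr ⟨rfl, hle, le_of_lt hxy⟩)]
      rw [pvLoopB_unfold, if_neg (by omega), abs_of_neg (by omega)]
      ring
    · rw [if_neg (by simp; omega)]
      obtain ⟨g, rfl⟩ : ∃ g, f = g + 1 := ⟨f - 1, by omega⟩
      rw [pvLoopA]
      rw [if_neg (by simp; omega)]
      have hstep := ih (x - y - b * 4).toNat (by omega) g (ans + b * 2 + b * 2 * 2)
        (b * 2 * 2) (by omega) (by omega) (by omega)
      simp only [Bool.not_not]
      rw [hstep]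
      rw [pvLoopB_unfold (x - y) b hb, if_pos (by omega)]
      have : b * 2 * 2 = b * 4 := by ring
      simp only [this]
      ring

-- ===== VERDICT (by name: the statement is the Claim_ definition above) =====
theorem website_solution_translated_spec : Claim_equal_website_solution_translated := by
  intro x y hdom
  unfold Dom_website_solution_translated pvDomInt at hdom
  simp only [Bool.and_eq_true, decide_eq_true_eq] at hdom
  obtain ⟨hx, hy⟩ := hdom
  unfold Spec_website_solution_translated website_solution_translated
      website_solution_translated_alt
  rcases lt_trichotomy x y with hxy | hxy | hxy
  · -- x < y : first probe direction already points at y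
    have h := pvLoopA_true x y hxy (y - x - 1).toNat (2 ^ 40) 0 1 one_pos rfl (by norm_num; omega)
    rw [h]
    rw [if_neg (by simp; omega), if_pos hxy, abs_of_pos (by omega)]
    ring
  · -- y = x : caught immediately with distance 0
    subst hxy
    rw [show (2 ^ 40 : Nat) = (2 ^ 40 - 1) + 1 by norm_num, pvLoopA, if_pos (Or.inl ⟨rfl, le_refl x, by omega⟩)]
    simp
  · -- y < x : the first (rightward) probe fails, then the lemma applies from dir = -1
    have h1 : pvLoopA x y (2 ^ 40) 0 1 true
        = pvLoopA x y (2 ^ 40 - 1) 2 2 false := by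
      rw [show (2 ^ 40 : Nat) = (2 ^ 40 - 1) + 1 by norm_num, pvLoopA]
      rw [if_neg (by simp; omega)]
      norm_num
    have h := pvLoopA_false x y hxy (x - y - 2).toNat (2 ^ 40 - 1) 2 2
      (by norm_num) rfl (by norm_num; omega)
    rw [h1, h]
    rw [if_neg (by simp; omega), if_neg (by omega), abs_of_neg (by omega)]
    have : -(y - x) = x - y := by ring
    rw [this]
    ring
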